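-- pv_equiv track=rewrite | github.com/heyhenry/python-problemsolving | 2026/March/problem_sets_again/pset_02/max_prime.py | max_prime
-- ===== SOURCE A (Python) =====
-- def max_prime(table : list[list[int]]) -> int:
--
--     def is_prime(num : int):
--         if num <= 1:
--             return False
--         else:
--             for i in range(2, int(num**0.5) + 1):
--                 if num % i == 0:
--                     return False
--         return True
--
--     results = []
--     for row in table:
--         for i in row:
--             if is_prime(i):
--                 results.append(i)
--     if results:
--         return max(results)
--     return -1
-- ===== SOURCE B (Python) =====
-- def max_prime(table: list[list[int]]) -> int:
--
--     def is_prime(num: int):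
--         if num <= 1:
--             return False
--         else:
--             for i in range(2, int(num**0.5) + 1):
--                 if num % i == 0:
--                     return False
--         return True
--
--     flat = [x for row in table for x in row]
--     flat.sort(reverse=True)
--     for x in flat:
--         if is_prime(x):
--             return x
--     return -1
-- ===== Notes on version B (the rewrite author's own statement) =====
-- stated objective: alternative
-- what changed: Instead of collecting every prime into a list and taking max at the end, B flattens the table, sorts it in descending order, and returns the first element that passes the identical is_prime test (early exit on the largest value), -1 if none.
import Mathlib
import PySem

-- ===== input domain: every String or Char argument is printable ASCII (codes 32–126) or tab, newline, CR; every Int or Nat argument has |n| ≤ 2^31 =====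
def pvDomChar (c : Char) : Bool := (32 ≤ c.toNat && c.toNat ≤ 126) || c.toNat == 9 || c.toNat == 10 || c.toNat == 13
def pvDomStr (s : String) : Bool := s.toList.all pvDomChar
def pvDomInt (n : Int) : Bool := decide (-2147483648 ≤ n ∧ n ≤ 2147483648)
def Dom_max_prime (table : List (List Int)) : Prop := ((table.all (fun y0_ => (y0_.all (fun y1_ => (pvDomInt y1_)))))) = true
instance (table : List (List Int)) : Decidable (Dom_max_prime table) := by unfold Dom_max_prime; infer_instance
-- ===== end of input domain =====

-- B replaces A's collect-all-primes-then-max pass by sort-descending-then-return-first-prime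
-- (early exit on the largest value); objective: alternative algorithm, same exact result.

-- ===== PORT A =====
-- shared helper: both Pythons define the identical nested `is_prime`.
-- `int(num**0.5)` is ported as `Nat.sqrt num.toNat`: exact for 0 ≤ num ≤ 2^31 (the stated
-- domain), where the float sqrt is correctly rounded and never crosses an integer boundary;
-- for num ≤ 1 the branch is not taken. The early-return loop is the `all` over the range.
def pyIsPrime (num : Int) : Bool :=
  if num ≤ 1 then
    false
  else
    (PySem.List.pyRange 2 ((Nat.sqrt num.toNat : Int) + 1) 1).all
      (fun i => !(decide (PySem.Int.mod num i = 0)))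

def max_prime (table : List (List Int)) : Int :=
  let results :=
    table.foldl (fun acc row =>
      row.foldl (fun acc i => if pyIsPrime i then acc ++ [i] else acc) acc) []
  match PySem.List.max? results (fun x => x) with
  | some m => m
  | none => -1

-- ===== PORT B =====
-- the `for x in flat: if is_prime(x): return x` loop of Source B, with its final `return -1`
def findFirstPrime : List Int → Int
  | [] => -1
  | x :: xs => if pyIsPrime x then x else findFirstPrime xs

def max_prime_alt (table : List (List Int)) : Int :=
  let flat := table.flatMap (fun row => row)
  findFirstPrime (PySem.List.sorted flat (fun x => x) true)

-- ===== PRECONDITION & SPEC =====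
def Spec_max_prime (table : List (List Int)) (out : Int) : Prop := out = max_prime_alt table
instance (table : List (List Int)) (out : Int) : Decidable (Spec_max_prime table out) := by unfold Spec_max_prime; infer_instance

-- ===== CLAIM (what is proved, stated in full; the proofs are below) =====
def Claim_equal_max_prime : Prop := ∀ (table : List (List Int)), Dom_max_prime table → Spec_max_prime table (max_prime table)

-- ===== LEMMAS AND PROOFS =====

-- A's nested collecting loops are: filter of the flattened table
theorem collect_eq_filter (table : List (List Int)) (acc : List Int) :
    table.foldl (fun acc row =>
      row.foldl (fun acc i => if pyIsPrime i then acc ++ [i] else acc) acc) acc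
    = acc ++ (table.flatMap (fun row => row)).filter pyIsPrime := by
  induction table generalizing acc with
  | nil => simp
  | cons row rest ih =>
    have hrow := PySem.List.foldl_append_if pyIsPrime (fun x => x) row acc
    simp only [List.foldl_cons, List.flatMap_cons, List.filter_append]
    rw [show (row.foldl (fun acc i => if pyIsPrime i then acc ++ [i] else acc) acc)
        = acc ++ (row.filter pyIsPrime) by simpa using hrow, ih, List.append_assoc]

-- no prime in ys → B's scan returns -1
theorem findFirst_of_filter_nil (ys : List Int) (h : ys.filter pyIsPrime = []) :
    findFirstPrime ys = -1 := by
  induction ys with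
  | nil => rfl
  | cons y t ih =>
    rw [List.filter_cons] at h
    by_cases hy : pyIsPrime y
    · simp [hy] at h
    · simpa [findFirstPrime, hy] using ih (by simpa [hy] using h)

-- on a descending list, B's scan returns the maximal prime value
theorem findFirst_eq_max (ys : List Int) (hp : List.Pairwise (fun a b => b ≤ a) ys)
    (m : Int) (hm : m ∈ ys) (hpm : pyIsPrime m)
    (hmax : ∀ y ∈ ys, pyIsPrime y → y ≤ m) :
    findFirstPrime ys = m := by
  induction ys with
  | nil => cases hm
  | cons y t ih =>
    rcases List.pairwise_cons.mp hp with ⟨hy_ge, hpt⟩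
    by_cases hy : pyIsPrime y
    · have h1 : y ≤ m := hmax y (List.mem_cons_self) hy
      have h2 : m ≤ y := by
        rcases List.mem_cons.mp hm with rfl | hmt
        · exact le_refl _
        · exact hy_ge m hmt
      simpa [findFirstPrime, hy] using (le_antisymm h2 h1).symm
    · have hmt : m ∈ t := by
        rcases List.mem_cons.mp hm with rfl | hmt
        · exact absurd hpm hy
        · exact hmt
      simpa [findFirstPrime, hy] using
        ih hpt hmt (fun y hy' hpy => hmax y (List.mem_cons_of_mem _ hy') hpy)

-- ===== VERDICT (by name: the statement is the Claim_ definition above) =====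
theorem max_prime_spec : Claim_equal_max_prime := by
  intro table _
  unfold Spec_max_prime max_prime max_prime_alt
  simp only [collect_eq_filter table [], List.nil_append]
  set flat := table.flatMap (fun row => row) with hflat
  set ys := PySem.List.sorted flat (fun x => x) true with hys
  have hperm : ys.Perm flat := PySem.List.sorted_perm flat (fun x => x) true
  have hpair : List.Pairwise (fun a b : Int => b ≤ a) ys :=
    PySem.List.sorted_pairwise_rev flat (fun x => x)
  cases hmx : PySem.List.max? (flat.filter pyIsPrime) (fun x => x) with
  | none =>
    have hnil : flat.filter pyIsPrime = [] :=
      (PySem.List.max?_eq_none_iff _ _).mp hmx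
    have : ys.filter pyIsPrime = [] := by
      have := (hperm.filter pyIsPrime)
      rw [hnil] at this
      exact this.eq_nil
    simp [findFirst_of_filter_nil ys this]
  | some m =>
    have hmem : m ∈ flat.filter pyIsPrime := PySem.List.max?_mem hmx
    have hpm : pyIsPrime m := (List.mem_filter.mp hmem).2
    have hmys : m ∈ ys := hperm.mem_iff.mpr (List.mem_filter.mp hmem).1
    have hmax : ∀ y ∈ ys, pyIsPrime y → y ≤ m := by
      intro y hy hpy
      exact PySem.List.max?_isMax hmx y
        (List.mem_filter.mpr ⟨hperm.mem_iff.mp hy, hpy⟩)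
    simp [findFirst_eq_max ys hpair m hmys hpm hmax]
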